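-- pv_equiv track=rewrite | github.com/RISHASUN001/LegacyModernization_Testing_SKILLS | skills_backup_pre_mate_sync_fix_20260416_114124/java-logic-understanding/run.py | _resolve_imported_files
-- ===== SOURCE A (Python) =====
-- def _resolve_imported_files(imports: set[str], package_to_files: dict[str, list[str]], fqcn_to_file: dict[str, str], strict_mode: bool) -> set[str]:
--     resolved: set[str] = set()
--     for imp in imports:
--         if imp in fqcn_to_file:
--             resolved.add(fqcn_to_file[imp])
--             continue
--
--         package = imp.rsplit(".", 1)[0] if "." in imp else ""
--         if not package:
--             continue
--
--         if strict_mode: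
--             resolved.update(package_to_files.get(package, []))
--         else:
--             for pkg, files in package_to_files.items():
--                 if pkg == package or pkg.startswith(package + "."):
--                     resolved.update(files)
--
--     return resolved
-- ===== SOURCE B (Python) =====
-- def _resolve_imported_files(imports: set[str], package_to_files: dict[str, list[str]], fqcn_to_file: dict[str, str], strict_mode: bool) -> set[str]:
--     # Precompute, per package prefix, the concatenation of the files of every package
--     # under it; each import then needs one dict lookup instead of a scan of all packages.
--     if strict_mode:
--         index = package_to_files
--     else:
--         index = {}
--         for pkg, files in package_to_files.items():
--             ancestors = [pkg[:i] for i, ch in enumerate(pkg) if ch == "."] + [pkg]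
--             for anc in ancestors:
--                 index[anc] = index.get(anc, []) + files
--
--     resolved: set[str] = set()
--     for imp in imports:
--         if imp in fqcn_to_file:
--             resolved.add(fqcn_to_file[imp])
--             continue
--         package = imp.rsplit(".", 1)[0] if "." in imp else ""
--         if package:
--             resolved.update(index.get(package, []))
--     return resolved
-- ===== Notes on version B (the rewrite author's own statement) =====
-- stated objective: alternative
-- what changed: B replaces A's per-import scan over all packages (with string prefix tests) by a dict index built once, keyed by every dot-ancestor prefix of each package key, so each non-fqcn import is resolved by a single dict lookup; it trades the per-import scan for the one-time index construction.
import Mathlib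
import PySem

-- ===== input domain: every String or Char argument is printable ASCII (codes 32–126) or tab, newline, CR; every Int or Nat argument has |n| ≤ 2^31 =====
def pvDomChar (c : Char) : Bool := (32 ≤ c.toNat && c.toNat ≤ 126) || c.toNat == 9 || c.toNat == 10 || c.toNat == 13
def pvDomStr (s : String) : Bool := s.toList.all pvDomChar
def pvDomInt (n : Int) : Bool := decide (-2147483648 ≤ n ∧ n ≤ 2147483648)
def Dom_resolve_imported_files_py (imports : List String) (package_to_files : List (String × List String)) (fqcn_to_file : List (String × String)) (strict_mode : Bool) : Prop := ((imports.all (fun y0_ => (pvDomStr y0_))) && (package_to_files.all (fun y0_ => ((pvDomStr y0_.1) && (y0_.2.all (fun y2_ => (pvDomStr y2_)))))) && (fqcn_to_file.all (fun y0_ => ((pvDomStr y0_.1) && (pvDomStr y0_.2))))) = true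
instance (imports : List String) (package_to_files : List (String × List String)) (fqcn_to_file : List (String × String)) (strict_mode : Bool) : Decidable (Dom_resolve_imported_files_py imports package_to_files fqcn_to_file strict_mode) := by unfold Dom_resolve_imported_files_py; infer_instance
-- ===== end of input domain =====

-- B replaces A's per-import scan of all packages by a one-time prefix index: for each
-- package key, its files are appended under every dot-ancestor prefix, so each import is
-- a single dict lookup (objective: alternative).
-- Dict keys are modeled as List Char (String.toList, injective) so lookups are Python-exact.

-- ===== PORT A =====
-- imp.rsplit(".", 1)[0] (ported by hand: prefix up to the last "."; exact when "." occurs in imp,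
-- which the surrounding `if "." in imp` guarantees), else "".
def pvPackageOf (imp : List Char) : List Char :=
  if PySem.Chars.isIn ['.'] imp then imp.take (PySem.Chars.rfind imp ['.']).toNat else []

def resolve_imported_files_py (imports : List String) (package_to_files : List (String × List String)) (fqcn_to_file : List (String × String)) (strict_mode : Bool) : List String :=
  let ftf : PySem.Dict (List Char) String :=
    PySem.Dict.ofList (fqcn_to_file.map (fun p => (p.1.toList, p.2)))
  let ptf : PySem.Dict (List Char) (List String) :=
    PySem.Dict.ofList (package_to_files.map (fun p => (p.1.toList, p.2)))
  imports.foldl (fun resolved imp =>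
    match ftf.get? imp.toList with
    | some f => PySem.Set.add resolved f
    | none =>
      let package := pvPackageOf imp.toList
      if package.isEmpty then resolved
      else if strict_mode then PySem.Set.update resolved (ptf.getD package [])
      else ptf.items.foldl (fun r p =>
        if p.1 == package || PySem.Chars.startswith p.1 (package ++ ['.'])
        then PySem.Set.update r p.2 else r) resolved) []

-- ===== PORT B =====
-- [pkg[:i] for i, ch in enumerate(pkg) if ch == "."] + [pkg]
def pvAncestors (pkg : List Char) : List (List Char) :=
  ((PySem.List.enumerate pkg).filterMap (fun p =>
    if p.2 == '.' then some (PySem.List.slice pkg none (some p.1)) else none)) ++ [pkg]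

def resolve_imported_files_py_alt (imports : List String) (package_to_files : List (String × List String)) (fqcn_to_file : List (String × String)) (strict_mode : Bool) : List String :=
  let ftf : PySem.Dict (List Char) String :=
    PySem.Dict.ofList (fqcn_to_file.map (fun p => (p.1.toList, p.2)))
  let ptf : PySem.Dict (List Char) (List String) :=
    PySem.Dict.ofList (package_to_files.map (fun p => (p.1.toList, p.2)))
  let index : PySem.Dict (List Char) (List String) :=
    if strict_mode then ptf
    else ptf.items.foldl (fun d p =>
      (pvAncestors p.1).foldl (fun d anc => d.modify anc [] (· ++ p.2)) d) PySem.Dict.empty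
  imports.foldl (fun resolved imp =>
    match ftf.get? imp.toList with
    | some f => PySem.Set.add resolved f
    | none =>
      let package := pvPackageOf imp.toList
      if package.isEmpty then resolved
      else PySem.Set.update resolved (index.getD package [])) []
-- ===== PRECONDITION & SPEC =====
def Spec_resolve_imported_files_py (imports : List String) (package_to_files : List (String × List String)) (fqcn_to_file : List (String × String)) (strict_mode : Bool) (out : List String) : Prop := out = resolve_imported_files_py_alt imports package_to_files fqcn_to_file strict_mode
instance (imports : List String) (package_to_files : List (String × List String)) (fqcn_to_file : List (String × String)) (strict_mode : Bool) (out : List String) : Decidable (Spec_resolve_imported_files_py imports package_to_files fqcn_to_file strict_mode out) := by unfold Spec_resolve_imported_files_py; infer_instance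

-- ===== CLAIM (what is proved, stated in full; the proofs are below) =====
def Claim_equal_resolve_imported_files_py : Prop := ∀ (imports : List String) (package_to_files : List (String × List String)) (fqcn_to_file : List (String × String)) (strict_mode : Bool), Dom_resolve_imported_files_py imports package_to_files fqcn_to_file strict_mode → Spec_resolve_imported_files_py imports package_to_files fqcn_to_file strict_mode (resolve_imported_files_py imports package_to_files fqcn_to_file strict_mode)

-- ===== LEMMAS AND PROOFS =====

-- membership in PySem.List.enumerate
theorem pv_mem_enumerate {α : Type} [DecidableEq α] (xs : List α) :
    ∀ (s i : Int) (c : α), (i, c) ∈ PySem.List.enumerate xs s ↔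
      ∃ k : Nat, k < xs.length ∧ i = s + k ∧ xs[k]? = some c := by
  induction xs with
  | nil => intro s i c; simp [PySem.List.enumerate_nil]
  | cons x t ih =>
    intro s i c
    rw [PySem.List.enumerate_cons]
    simp only [List.mem_cons, Prod.mk.injEq, ih]
    constructor
    · rintro (⟨hi, hc⟩ | ⟨k, hk, hi, hc⟩)
      · exact ⟨0, by simp, by omega, by simp [hc]⟩
      · exact ⟨k + 1, by simpa using hk, by omega, by simpa using hc⟩
    · rintro ⟨k, hk, hi, hc⟩
      cases k with
      | zero => left; constructor; omega; simpa using hc.symm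
      | succ k => right; exact ⟨k, by simpa using hk, by omega, by simpa using hc⟩

-- (q ++ ['.']) is a prefix of pkg iff q is pkg cut at a dot
theorem pv_prefix_dot (pkg q : List Char) :
    (q ++ ['.']) <+: pkg ↔ ∃ k : Nat, k < pkg.length ∧ pkg[k]? = some '.' ∧ q = pkg.take k := by
  constructor
  · rintro ⟨t, ht⟩
    refine ⟨q.length, ?_, ?_, ?_⟩
    · rw [← ht]; simp
    · rw [← ht]; simp
    · rw [← ht, List.append_assoc, List.take_left]
  · rintro ⟨k, hk, hdot, rfl⟩
    refine ⟨pkg.drop (k + 1), ?_⟩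
    have h := List.take_append_drop k pkg
    rw [List.drop_eq_getElem_cons hk] at h
    rw [List.getElem?_eq_getElem hk] at hdot
    simp only [Option.some.injEq] at hdot
    rw [hdot] at h
    rw [List.append_assoc, List.singleton_append]
    exact h

-- q is an ancestor of pkg exactly when A's scan condition holds
theorem pv_mem_ancestors (pkg q : List Char) :
    q ∈ pvAncestors pkg ↔ (pkg == q || PySem.Chars.startswith pkg (q ++ ['.'])) = true := by
  unfold pvAncestors
  rw [List.mem_append, List.mem_filterMap, Bool.or_eq_true, beq_iff_eq,
      PySem.Chars.startswith_iff, pv_prefix_dot]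
  constructor
  · rintro (⟨⟨i, c⟩, hmem, hf⟩ | hq)
    · rcases (pv_mem_enumerate pkg 0 i c).mp hmem with ⟨k, hk, hi, hc⟩
      right
      by_cases hdot : c = '.'
      · refine ⟨k, hk, by rw [hc, hdot], ?_⟩
        simp only [hdot] at hf
        rw [if_pos (by simp)] at hf
        simp only [Option.some.injEq] at hf
        rw [← hf, hi, PySem.List.slice_to pkg (by omega)]
        congr 1
        omega
      · rw [if_neg (by simpa using hdot)] at hf; exact absurd hf (by simp)
    · simp only [List.mem_singleton] at hq
      left; exact hq.symm
  · rintro (hq | ⟨k, hk, hdot, rfl⟩)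
    · right; simp [hq]
    · left
      refine ⟨((k : Int), '.'), (pv_mem_enumerate pkg 0 (k : Int) '.').mpr ⟨k, hk, by omega, hdot⟩, ?_⟩
      rw [if_pos (by simp)]
      rw [PySem.List.slice_to pkg (by omega)]
      simp

-- ancestors are pairwise distinct (strictly increasing lengths)
-- the filterMap part of pvAncestors has strictly increasing lengths
theorem pv_anc_chain (pkg : List Char) :
    ∀ l : List (Int × Char), (∀ p ∈ l, 0 ≤ p.1 ∧ p.1 < (pkg.length : Int)) →
    l.Pairwise (fun a b => a.1 < b.1) →
    (l.filterMap (fun p =>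
        if p.2 == '.' then some (PySem.List.slice pkg none (some p.1)) else none)).Pairwise
      (fun a b : List Char => a.length < b.length) := by
  intro l
  induction l with
  | nil => intro _ _; simp
  | cons p t ih =>
    intro hb hp
    rcases List.pairwise_cons.mp hp with ⟨hhead, htail⟩
    have hbp := hb p List.mem_cons_self
    rw [List.filterMap_cons]
    by_cases hdot : p.2 == '.'
    · rw [if_pos hdot]
      refine List.pairwise_cons.mpr ⟨?_, ih (fun x hx => hb x (List.mem_cons_of_mem _ hx)) htail⟩
      intro b hbmem
      rcases List.mem_filterMap.mp hbmem with ⟨p', hp', hf⟩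
      have hbp' := hb p' (List.mem_cons_of_mem _ hp')
      by_cases hdot' : p'.2 == '.'
      · rw [if_pos hdot'] at hf
        simp only [Option.some.injEq] at hf
        rw [← hf, PySem.List.slice_to pkg hbp.1, PySem.List.slice_to pkg hbp'.1]
        have := hhead p' hp'
        simp only [List.length_take]
        omega
      · rw [if_neg hdot'] at hf; exact absurd hf (by simp)
    · rw [if_neg hdot]
      exact ih (fun x hx => hb x (List.mem_cons_of_mem _ hx)) htail

theorem pv_nodup_ancestors (pkg : List Char) : (pvAncestors pkg).Nodup := by
  have hchain : (pvAncestors pkg).Pairwise (fun a b : List Char => a.length < b.length) := by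
    unfold pvAncestors
    rw [List.pairwise_append]
    refine ⟨?_, by simp, ?_⟩
    · apply pv_anc_chain
      · intro p hp
        rcases (pv_mem_enumerate pkg 0 p.1 p.2).mp hp with ⟨k, hk, hi, _⟩
        omega
      · have h1 : ((PySem.List.enumerate pkg).map (·.1)).Pairwise (· < ·) := by
          rw [PySem.List.map_fst_enumerate]
          exact PySem.List.pairwise_lt_pyRange_one _ _
        exact (List.pairwise_map.mp h1)
    · intro a ha b hb
      rcases List.mem_filterMap.mp ha with ⟨p', hp', hf⟩
      rcases (pv_mem_enumerate pkg 0 p'.1 p'.2).mp hp' with ⟨k, hk, hi, _⟩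
      by_cases hdot' : p'.2 == '.'
      · rw [if_pos hdot'] at hf
        simp only [Option.some.injEq] at hf
        rw [List.mem_singleton] at hb
        rw [← hf, hb, PySem.List.slice_to pkg (by omega)]
        simp only [List.length_take]
        omega
      · rw [if_neg hdot'] at hf; exact absurd hf (by simp)
  exact List.Pairwise.imp (fun {a b} h heq => by rw [heq] at h; omega) hchain

-- Set.update over an append splits
theorem pv_set_update_append (s : PySem.Set String) (a b : List String) :
    PySem.Set.update s (a ++ b) = PySem.Set.update (PySem.Set.update s a) b := by
  simp [PySem.Set.update, List.foldl_append]

-- the append-accumulating fold with any Bool condition, re-based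
theorem pv_foldl_append_if_init {β : Type} (c : β → Bool) (v : β → List String)
    (l : List β) : ∀ a : List String,
    l.foldl (fun acc x => if c x then acc ++ v x else acc) a =
      a ++ l.foldl (fun acc x => if c x then acc ++ v x else acc) [] := by
  induction l with
  | nil => simp
  | cons x t ih =>
    intro a
    simp only [List.foldl_cons]
    by_cases h : c x = true
    · rw [if_pos h, if_pos h, ih (a ++ v x), ih ([] ++ v x)]
      simp
    · simp only [Bool.not_eq_true] at h; rw [if_neg (by simp [h]), if_neg (by simp [h])]
      exact ih a

-- A's inner scan equals one Set.update with the matched files concatenated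
theorem pv_scan_eq_update (q : List Char) (items : List (List Char × List String)) :
    ∀ r : PySem.Set String,
    items.foldl (fun r p => if (p.1 == q || PySem.Chars.startswith p.1 (q ++ ['.'])) then PySem.Set.update r p.2 else r) r =
      PySem.Set.update r
        (items.foldl (fun l p => if (p.1 == q || PySem.Chars.startswith p.1 (q ++ ['.'])) then l ++ p.2 else l) []) := by
  induction items with
  | nil => intro r; simp [PySem.Set.update]
  | cons p t ih =>
    intro r
    simp only [List.foldl_cons]
    by_cases h : (p.1 == q || PySem.Chars.startswith p.1 (q ++ ['.'])) = true
    · rw [if_pos h, if_pos h, ih, pv_foldl_append_if_init (fun p => (p.1 == q || PySem.Chars.startswith p.1 (q ++ ['.']))) Prod.snd t (List.nil ++ p.2)]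
      simp [pv_set_update_append]
    · simp only [Bool.not_eq_true] at h
      rw [if_neg (by simp [h]), if_neg (by simp [h])]
      exact ih r

-- one package's pass over its ancestors, as seen by a getD at q
theorem pv_getD_fold_modify (files : List String) (q : List Char) :
    ∀ (ancs : List (List Char)), ancs.Nodup →
    ∀ d : PySem.Dict (List Char) (List String),
    (ancs.foldl (fun d a => d.modify a [] (· ++ files)) d).getD q [] =
      if q ∈ ancs then d.getD q [] ++ files else d.getD q [] := by
  intro ancs
  induction ancs with
  | nil => intro _ d; simp
  | cons a t ih =>
    intro hnd d
    simp only [List.foldl_cons]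
    rcases List.nodup_cons.mp hnd with ⟨ha, ht⟩
    rw [ih ht]
    by_cases hq : q = a
    · subst hq
      rw [if_neg ha, if_pos (List.mem_cons_self), PySem.Dict.getD_modify_self]
    · rw [PySem.Dict.getD_modify_of_ne d ([] : List String) (· ++ files) hq]
      by_cases hqt : q ∈ t
      · rw [if_pos hqt, if_pos (List.mem_cons_of_mem _ hqt)]
      · rw [if_neg hqt, if_neg (by simp [hq, hqt])]

-- the built index, looked up at q, is exactly the matched-files concatenation
theorem pv_index_getD (q : List Char) (items : List (List Char × List String)) :
    ∀ d : PySem.Dict (List Char) (List String),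
    (items.foldl (fun d p =>
        (pvAncestors p.1).foldl (fun d anc => d.modify anc [] (· ++ p.2)) d) d).getD q [] =
      d.getD q [] ++ items.foldl (fun l p => if (p.1 == q || PySem.Chars.startswith p.1 (q ++ ['.'])) then l ++ p.2 else l) [] := by
  induction items with
  | nil => intro d; simp
  | cons p t ih =>
    intro d
    simp only [List.foldl_cons]
    rw [ih, pv_getD_fold_modify p.2 q (pvAncestors p.1) (pv_nodup_ancestors p.1) d,
        pv_foldl_append_if_init (fun p => (p.1 == q || PySem.Chars.startswith p.1 (q ++ ['.']))) Prod.snd t]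
    by_cases h : (p.1 == q || PySem.Chars.startswith p.1 (q ++ ['.'])) = true
    · rw [if_pos ((pv_mem_ancestors p.1 q).mpr h), if_pos h, List.append_assoc]
      simp only [List.append_cancel_left_eq]
      exact (pv_foldl_append_if_init (fun x => (x.1 == q || PySem.Chars.startswith x.1 (q ++ ['.']))) Prod.snd t p.2).symm
    · simp only [Bool.not_eq_true] at h
      rw [if_neg (fun hm => by simp [(pv_mem_ancestors p.1 q).mp hm] at h), if_neg (by simp [h])]
      simp

-- ===== VERDICT (by name: the statement is the Claim_ definition above) =====
theorem resolve_imported_files_py_spec : Claim_equal_resolve_imported_files_py := by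
  intro imports package_to_files fqcn_to_file strict_mode _
  unfold Spec_resolve_imported_files_py resolve_imported_files_py resolve_imported_files_py_alt
  simp only []
  congr 1
  funext resolved imp
  cases hget : (PySem.Dict.ofList (fqcn_to_file.map
      (fun p => (p.1.toList, p.2)))).get? imp.toList with
  | some f => rfl
  | none =>
    simp only []
    by_cases hemp : (pvPackageOf imp.toList).isEmpty
    · rw [if_pos hemp, if_pos hemp]
    · rw [if_neg hemp, if_neg hemp]
      cases strict_mode with
      | true => simp
      | false =>
        simp only [Bool.false_eq_true, if_false]
        rw [pv_scan_eq_update (pvPackageOf imp.toList),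
            pv_index_getD (pvPackageOf imp.toList) _ PySem.Dict.empty,
            PySem.Dict.getD_empty]
        simp
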